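-- pv_equiv track=rewrite | github.com/NihalMishra17/agent-infra | api.py | _parse_planner_entry
-- ===== SOURCE A (Python) =====
-- def _parse_planner_entry(content: str) -> int:
--     """Count expected tasks from a planner memory entry."""
--     count = 0
--     in_tasks = False
--     for line in content.splitlines():
--         if line.strip() == "Tasks:":
--             in_tasks = True
--         elif in_tasks and line.startswith("- "):
--             count += 1
--         elif in_tasks and line and not line.startswith("- "):
--             break
--     return count
-- ===== SOURCE B (Python) =====
-- def _parse_planner_entry(content: str) -> int:
--     """Count expected tasks from a planner memory entry."""
--     lines = content.splitlines()
--     idx = next((i for i, l in enumerate(lines) if l.strip() == "Tasks:"), None)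
--     if idx is None:
--         return 0
--     count = 0
--     for line in lines[idx + 1:]:
--         if not line or line.strip() == "Tasks:":
--             continue
--         if line.startswith("- "):
--             count += 1
--         else:
--             break
--     return count
-- ===== Notes on version B (the rewrite author's own statement) =====
-- stated objective: simpler
-- what changed: Replaces the single-pass boolean state machine with a two-phase locate-then-scan: first find the first marker line, then count bullet lines in the suffix, skipping empty and repeated-marker lines and breaking on any other non-empty line.
import Mathlib
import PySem

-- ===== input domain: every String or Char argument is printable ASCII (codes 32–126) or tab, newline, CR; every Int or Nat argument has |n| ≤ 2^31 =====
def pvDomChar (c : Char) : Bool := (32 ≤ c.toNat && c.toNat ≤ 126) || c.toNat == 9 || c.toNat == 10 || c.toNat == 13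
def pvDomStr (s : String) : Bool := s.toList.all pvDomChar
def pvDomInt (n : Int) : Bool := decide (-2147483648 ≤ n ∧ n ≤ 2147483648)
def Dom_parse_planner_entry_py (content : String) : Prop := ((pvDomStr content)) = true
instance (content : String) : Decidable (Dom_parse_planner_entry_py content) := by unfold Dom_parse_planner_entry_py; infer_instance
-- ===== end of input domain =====

-- B replaces A's one-pass boolean state machine with a locate-then-scan decomposition (objective: simpler).

-- ===== PORT A =====
-- A's for-loop with break, as structural recursion over the remaining lines with state (count, in_tasks)
def pvLoopA : List String → Int → Bool → Int
  | [], count, _ => count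
  | line :: rest, count, in_tasks =>
    if PySem.Str.strip line = "Tasks:" then
      pvLoopA rest count true
    else if in_tasks && PySem.Str.startswith line "- " then
      pvLoopA rest (count + 1) in_tasks
    else if in_tasks && line ≠ "" && !(PySem.Str.startswith line "- ") then
      count  -- break
    else
      pvLoopA rest count in_tasks

def parse_planner_entry_py (content : String) : Int :=
  pvLoopA (PySem.Str.splitlines content) 0 false

-- ===== PORT B =====
-- phase 1: locate the first line whose strip is "Tasks:", returning the suffix after it (Source B's idx / lines[idx+1:])
def pvFindTasks : List String → Option (List String)
  | [] => none
  | line :: rest => if PySem.Str.strip line = "Tasks:" then some rest else pvFindTasks rest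

-- phase 2: Source B's counting loop over the suffix
def pvLoopB : List String → Int → Int
  | [], count => count
  | line :: rest, count =>
    if line = "" || PySem.Str.strip line = "Tasks:" then
      pvLoopB rest count  -- continue
    else if PySem.Str.startswith line "- " then
      pvLoopB rest (count + 1)
    else
      count  -- break

def parse_planner_entry_py_alt (content : String) : Int :=
  match pvFindTasks (PySem.Str.splitlines content) with
  | none => 0
  | some rest => pvLoopB rest 0

-- ===== PRECONDITION & SPEC =====
def Spec_parse_planner_entry_py (content : String) (out : Int) : Prop := out = parse_planner_entry_py_alt content
instance (content : String) (out : Int) : Decidable (Spec_parse_planner_entry_py content out) := by unfold Spec_parse_planner_entry_py; infer_instance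

-- ===== CLAIM (what is proved, stated in full; the proofs are below) =====
def Claim_equal_parse_planner_entry_py : Prop := ∀ (content : String), Dom_parse_planner_entry_py content → Spec_parse_planner_entry_py content (parse_planner_entry_py content)

-- ===== LEMMAS AND PROOFS =====

-- once in_tasks is set, A's loop and B's counting loop agree
theorem pvLoopA_true (ls : List String) (c : Int) : pvLoopA ls c true = pvLoopB ls c := by
  induction ls generalizing c with
  | nil => rfl
  | cons l rest ih =>
    simp only [pvLoopA, pvLoopB]
    by_cases h1 : PySem.Str.strip l = "Tasks:"
    · simp [h1, ih]
    · by_cases h2 : l = ""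
      · simp [h2, PySem.Str.startswith, PySem.Chars.startswith, ih]
      · by_cases h3 : PySem.Chars.startswith l.toList ['-', ' '] = true
        · simp [h1, h2, h3, ih]
        · simp [h1, h2, h3]

-- before the marker is found, A's loop equals B's locate-then-scan
theorem pvLoopA_false (ls : List String) (c : Int) :
    pvLoopA ls c false = (match pvFindTasks ls with | none => c | some rest => pvLoopB rest c) := by
  induction ls with
  | nil => rfl
  | cons l rest ih =>
    simp only [pvLoopA, pvFindTasks]
    by_cases h1 : PySem.Str.strip l = "Tasks:"
    · simp [h1, pvLoopA_true]
    · simp [h1, ih]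

-- ===== VERDICT (by name: the statement is the Claim_ definition above) =====
theorem parse_planner_entry_py_spec : Claim_equal_parse_planner_entry_py := by
  intro content _
  unfold Spec_parse_planner_entry_py parse_planner_entry_py parse_planner_entry_py_alt
  rw [pvLoopA_false]
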